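-- pv_equiv track=rewrite | github.com/GongQihua/leetcode_practice | HW_Python/面试/36_十八进制数比较大小.py | hex18_to_decimal
-- ===== SOURCE A (Python) =====
-- def hex18_to_decimal(hex18_str):
--     """将十八进制字符串转换为十进制整数"""
--     decimal_value = 0
--     for i, char in enumerate(reversed(hex18_str)):
--         if char.isdigit():
--             value = int(char)
--         else:
--             value = ord(char.upper()) - ord('A') + 10
--         decimal_value += value * (18 ** i)
--     return decimal_value
-- ===== SOURCE B (Python) =====
-- def hex18_to_decimal(hex18_str):
--     """将十八进制字符串转换为十进制整数 (Horner's method, forward pass)"""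
--     result = 0
--     for char in hex18_str:
--         if char.isdigit():
--             value = int(char)
--         else:
--             value = ord(char.upper()) - ord('A') + 10
--         result = result * 18 + value
--     return result
-- ===== Notes on version B (the rewrite author's own statement) =====
-- stated objective: faster
-- what changed: Horner's method: one forward pass maintaining result = result*18 + value, instead of enumerating the reversed string and recomputing the big-integer power 18**i at every position.
import Mathlib
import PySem

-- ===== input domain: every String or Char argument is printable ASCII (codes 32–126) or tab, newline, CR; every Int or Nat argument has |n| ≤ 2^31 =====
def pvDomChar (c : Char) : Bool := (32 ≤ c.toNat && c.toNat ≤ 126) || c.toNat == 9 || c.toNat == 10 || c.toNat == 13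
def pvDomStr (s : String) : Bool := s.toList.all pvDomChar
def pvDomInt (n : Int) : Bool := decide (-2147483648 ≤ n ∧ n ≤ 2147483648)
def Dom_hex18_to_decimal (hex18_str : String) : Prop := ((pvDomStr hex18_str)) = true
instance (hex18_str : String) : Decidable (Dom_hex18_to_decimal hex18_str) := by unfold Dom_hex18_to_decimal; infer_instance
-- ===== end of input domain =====

-- B replaces A's reversed-enumerate sum of value * 18**i by an idiomatic forward Horner pass (result = result*18 + value); same value on every input.


-- ===== PORT A =====
-- shared value-extraction step, identical in both Pythons:
-- if char.isdigit(): value = int(char) else: value = ord(char.upper()) - ord('A') + 10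
-- (int(char) on a digit char = code - 48; ord / upper are exact on the ASCII domain)
def pvCharVal (c : Char) : Int :=
  if PySem.Chars.isdigit c then (c.toNat : Int) - 48
  else ((PySem.Chars.upperChar c).toNat : Int) - 65 + 10

def hex18_to_decimal (hex18_str : String) : Int :=
  (PySem.List.enumerate hex18_str.toList.reverse).foldl
    (fun decimal_value ic => decimal_value + pvCharVal ic.2 * (18 : Int) ^ ic.1.toNat) 0

-- ===== PORT B =====
def hex18_to_decimal_alt (hex18_str : String) : Int :=
  hex18_str.toList.foldl (fun result c => result * 18 + pvCharVal c) 0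

-- ===== PRECONDITION & SPEC =====
def Spec_hex18_to_decimal (hex18_str : String) (out : Int) : Prop := out = hex18_to_decimal_alt hex18_str
instance (hex18_str : String) (out : Int) : Decidable (Spec_hex18_to_decimal hex18_str out) := by unfold Spec_hex18_to_decimal; infer_instance

-- ===== CLAIM (what is proved, stated in full; the proofs are below) =====
def Claim_equal_hex18_to_decimal : Prop := ∀ (hex18_str : String), Dom_hex18_to_decimal hex18_str → Spec_hex18_to_decimal hex18_str (hex18_to_decimal hex18_str)

-- ===== LEMMAS AND PROOFS =====

-- evalRev l = Σᵢ pvCharVal l[i] * 18^i (little-endian reading of l)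
def evalRev : List Char → Int
  | [] => 0
  | c :: cs => pvCharVal c + 18 * evalRev cs

theorem foldlA_evalRev (l : List Char) (k : Nat) (d : Int) :
    (PySem.List.enumerate l (k : Int)).foldl
      (fun decimal_value ic => decimal_value + pvCharVal ic.2 * (18 : Int) ^ ic.1.toNat) d
    = d + (18 : Int) ^ k * evalRev l := by
  induction l generalizing k d with
  | nil => simp [PySem.List.enumerate, evalRev]
  | cons c cs ih =>
    have h1 : ((k : Int) + 1) = ((k + 1 : Nat) : Int) := by push_cast; ring
    simp only [PySem.List.enumerate_cons, List.foldl_cons, h1, ih, Int.toNat_natCast, evalRev]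
    ring

theorem evalRev_append (xs : List Char) (c : Char) :
    evalRev (xs ++ [c]) = evalRev xs + pvCharVal c * (18 : Int) ^ xs.length := by
  induction xs with
  | nil => simp [evalRev]
  | cons x xs ih => simp [evalRev, ih, pow_succ]; ring

theorem foldlB_evalRev (l : List Char) (a : Int) :
    l.foldl (fun result c => result * 18 + pvCharVal c) a
    = a * (18 : Int) ^ l.length + evalRev l.reverse := by
  induction l generalizing a with
  | nil => simp [evalRev]
  | cons c cs ih =>
    simp only [List.foldl_cons, ih, List.reverse_cons, evalRev_append, List.length_cons,
      List.length_reverse, pow_succ]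
    ring

-- ===== VERDICT (by name: the statement is the Claim_ definition above) =====
theorem hex18_to_decimal_spec : Claim_equal_hex18_to_decimal := by
  intro s _
  unfold Spec_hex18_to_decimal hex18_to_decimal hex18_to_decimal_alt
  have hA := foldlA_evalRev s.toList.reverse 0 0
  have hB := foldlB_evalRev s.toList 0
  simp at hA hB
  rw [hA, hB]
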